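-- pv_equiv track=rewrite | github.com/broken-byte/HR_test_environment_with_solutions | greedy_algorithms/medium_problems/max_min/max_min_algs.py | max_min_brute_force_approach
-- ===== SOURCE A (Python) =====
-- from itertools import combinations
--
-- def max_min_brute_force_approach(k: int, arr: list) -> int:
--     all_k_combinations_of_arr = combinations(arr, k)
--     all_k_combinations_of_arr = list(all_k_combinations_of_arr)
--     min_unfairness: int = max(all_k_combinations_of_arr[0]) - min(all_k_combinations_of_arr[0])
--     for combination in all_k_combinations_of_arr:
--         unfairness: int = max(combination) - min(combination)
--         if unfairness < min_unfairness:
--             min_unfairness = unfairness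
--     return min_unfairness
-- ===== SOURCE B (Python) =====
-- def max_min_brute_force_approach(k: int, arr: list) -> int:
--     s = sorted(arr)
--     return min(s[i + k - 1] - s[i] for i in range(len(s) - k + 1))
-- ===== Notes on version B (the rewrite author's own statement) =====
-- stated objective: faster
-- what changed: replaces the exhaustive scan of all C(n,k) combinations with sort-then-slide: after sorting, the minimum unfairness is the minimum of s[i+k-1]-s[i] over all length-k windows
import Mathlib
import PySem

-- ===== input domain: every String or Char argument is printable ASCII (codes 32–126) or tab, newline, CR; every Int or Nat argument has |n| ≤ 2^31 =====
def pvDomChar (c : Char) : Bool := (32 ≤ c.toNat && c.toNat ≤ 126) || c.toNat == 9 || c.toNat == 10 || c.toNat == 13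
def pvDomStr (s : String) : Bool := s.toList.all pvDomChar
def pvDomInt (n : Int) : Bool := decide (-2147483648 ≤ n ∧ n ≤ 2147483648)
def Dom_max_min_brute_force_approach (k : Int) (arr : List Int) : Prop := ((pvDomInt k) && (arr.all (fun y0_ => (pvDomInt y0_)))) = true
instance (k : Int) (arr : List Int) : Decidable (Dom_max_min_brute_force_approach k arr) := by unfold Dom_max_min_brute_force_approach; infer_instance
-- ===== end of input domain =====

-- B replaces A's scan of all C(n,k) combinations by sort-then-slide over length-k windows (objective: faster, asymptotically).

-- ===== PORT A =====
-- itertools.combinations(arr, k): all length-k subsequences of arr, in Python's order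
def pvCombos (k : Nat) (l : List Int) : List (List Int) :=
  match k, l with
  | 0, _ => [[]]
  | _ + 1, [] => []
  | k' + 1, x :: xs => (pvCombos k' xs).map (fun c => x :: c) ++ pvCombos (k' + 1) xs

-- Python max(c) / min(c); the default 0 is only reached on the empty list (excluded by Pre_)
def pyMaxD (l : List Int) : Int := (PySem.List.max? l (fun y => y)).getD 0
def pyMinD (l : List Int) : Int := (PySem.List.min? l (fun y => y)).getD 0

def max_min_brute_force_approach (k : Int) (arr : List Int) : Int :=
  let cs := pvCombos k.toNat arr
  let first := cs.headD []
  let init := pyMaxD first - pyMinD first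
  cs.foldl (fun m c => let u := pyMaxD c - pyMinD c; if u < m then u else m) init

-- ===== PORT B =====
def max_min_brute_force_approach_alt (k : Int) (arr : List Int) : Int :=
  let s := PySem.List.sorted arr (fun y => y) false
  let diffs := (PySem.List.pyRange 0 (PySem.List.len s - k + 1) 1).map
      (fun i => PySem.List.pyGetD s (i + k - 1) 0 - PySem.List.pyGetD s i 0)
  (PySem.List.min? diffs (fun y => y)).getD 0

-- ===== PRECONDITION & SPEC =====
-- Python A raises outside 1 ≤ k ≤ len(arr): ValueError for k < 0 (combinations) and k = 0 (max of the
-- empty tuple), IndexError for k > len(arr) (indexing the empty combination list).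
def Pre_max_min_brute_force_approach (k : Int) (arr : List Int) : Prop :=
  1 ≤ k ∧ k ≤ (arr.length : Int)
instance (k : Int) (arr : List Int) : Decidable (Pre_max_min_brute_force_approach k arr) := by
  unfold Pre_max_min_brute_force_approach; infer_instance
def pvWitness_max_min_brute_force_approach : Int × List Int := (2, [1, 4, 7, 2])
def Spec_max_min_brute_force_approach (k : Int) (arr : List Int) (out : Int) : Prop := out = max_min_brute_force_approach_alt k arr
instance (k : Int) (arr : List Int) (out : Int) : Decidable (Spec_max_min_brute_force_approach k arr out) := by unfold Spec_max_min_brute_force_approach; infer_instance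

-- ===== CLAIM (what is proved, stated in full; the proofs are below) =====
def Claim_equal_max_min_brute_force_approach : Prop := ∀ (k : Int) (arr : List Int), Dom_max_min_brute_force_approach k arr → Pre_max_min_brute_force_approach k arr → Spec_max_min_brute_force_approach k arr (max_min_brute_force_approach k arr)

-- ===== LEMMAS AND PROOFS =====

-- extrema helpers
theorem pyMaxD_mem (l : List Int) (h : l ≠ []) : pyMaxD l ∈ l := by
  cases hm : PySem.List.max? l (fun y => y) with
  | none => exact absurd ((PySem.List.max?_eq_none_iff l _).mp hm) h
  | some m => simpa [pyMaxD, hm] using PySem.List.max?_mem hm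

theorem pyMaxD_ge (l : List Int) (h : l ≠ []) : ∀ x ∈ l, x ≤ pyMaxD l := by
  cases hm : PySem.List.max? l (fun y => y) with
  | none => exact absurd ((PySem.List.max?_eq_none_iff l _).mp hm) h
  | some m =>
    intro x hx
    simpa [pyMaxD, hm] using PySem.List.max?_isMax hm x hx

theorem pyMinD_mem (l : List Int) (h : l ≠ []) : pyMinD l ∈ l := by
  cases hm : PySem.List.min? l (fun y => y) with
  | none => exact absurd ((PySem.List.min?_eq_none_iff l _).mp hm) h
  | some m => simpa [pyMinD, hm] using PySem.List.min?_mem hm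

theorem pyMinD_le (l : List Int) (h : l ≠ []) : ∀ x ∈ l, pyMinD l ≤ x := by
  cases hm : PySem.List.min? l (fun y => y) with
  | none => exact absurd ((PySem.List.min?_eq_none_iff l _).mp hm) h
  | some m =>
    intro x hx
    simpa [pyMinD, hm] using PySem.List.min?_isMin hm x hx

theorem pyMaxD_perm (l l' : List Int) (hp : l.Perm l') (h : l ≠ []) : pyMaxD l = pyMaxD l' := by
  have h' : l' ≠ [] := by
    intro he; exact h (List.Perm.eq_nil (he ▸ hp))
  exact le_antisymm
    (pyMaxD_ge l' h' _ (hp.mem_iff.mp (pyMaxD_mem l h)))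
    (pyMaxD_ge l h _ (hp.mem_iff.mpr (pyMaxD_mem l' h')))

theorem pyMinD_perm (l l' : List Int) (hp : l.Perm l') (h : l ≠ []) : pyMinD l = pyMinD l' := by
  have h' : l' ≠ [] := by
    intro he; exact h (List.Perm.eq_nil (he ▸ hp))
  exact le_antisymm
    (pyMinD_le l h _ (hp.mem_iff.mpr (pyMinD_mem l' h')))
    (pyMinD_le l' h' _ (hp.mem_iff.mp (pyMinD_mem l h)))

-- combinations = length-k sublists
theorem mem_pvCombos (l : List Int) : ∀ (k : Nat) (c : List Int),
    c ∈ pvCombos k l ↔ c.Sublist l ∧ c.length = k := by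
  induction l with
  | nil =>
    intro k c
    cases k with
    | zero => simp [pvCombos, List.sublist_nil]
    | succ k' => simp [pvCombos, List.sublist_nil]; rintro rfl; simp
  | cons x xs ih =>
    intro k c
    cases k with
    | zero =>
      simp only [pvCombos, List.mem_singleton]
      constructor
      · rintro rfl; exact ⟨List.nil_sublist _, rfl⟩
      · rintro ⟨_, hl⟩; exact List.eq_nil_of_length_eq_zero hl
    | succ k' =>
      simp only [pvCombos, List.mem_append, List.mem_map]
      rw [List.sublist_cons_iff]
      constructor
      · rintro (⟨c', hc', rfl⟩ | h)
        · rcases (ih k' c').mp hc' with ⟨hs, hl⟩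
          exact ⟨Or.inr ⟨c', rfl, hs⟩, by simp [hl]⟩
        · rcases (ih (k' + 1) c).mp h with ⟨hs, hl⟩
          exact ⟨Or.inl hs, hl⟩
      · rintro ⟨h | ⟨r, rfl, hr⟩, hl⟩
        · exact Or.inr ((ih (k' + 1) c).mpr ⟨h, hl⟩)
        · exact Or.inl ⟨r, (ih k' r).mpr ⟨hr, by simpa using hl⟩, rfl⟩

-- foldl-min facts
theorem foldlMin_le_init (L : List Int) : ∀ a : Int, L.foldl min a ≤ a := by
  induction L with
  | nil => intro a; simp
  | cons y t ih => intro a; exact le_trans (ih (min a y)) (min_le_left a y)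

theorem foldlMin_le_mem (L : List Int) : ∀ (a x : Int), x ∈ L → L.foldl min a ≤ x := by
  induction L with
  | nil => intro a x hx; simp at hx
  | cons y t ih =>
    intro a x hx
    rcases List.mem_cons.mp hx with rfl | hx
    · exact le_trans (foldlMin_le_init t (min a x)) (min_le_right a x)
    · exact ih (min a y) x hx

theorem foldlMin_cases (L : List Int) : ∀ a : Int, L.foldl min a = a ∨ L.foldl min a ∈ L := by
  induction L with
  | nil => intro a; simp
  | cons y t ih =>
    intro a
    rcases ih (min a y) with h | h
    · rcases min_cases a y with ⟨he, _⟩ | ⟨he, _⟩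
      · exact Or.inl (by rw [List.foldl_cons, h, he])
      · exact Or.inr (by rw [List.foldl_cons, h, he]; simp)
    · exact Or.inr (List.mem_cons_of_mem y h)

theorem foldf_eq (cs : List (List Int)) : ∀ init : Int,
    cs.foldl (fun m c => if pyMaxD c - pyMinD c < m then pyMaxD c - pyMinD c else m) init
      = (cs.map (fun c => pyMaxD c - pyMinD c)).foldl min init := by
  induction cs with
  | nil => intro init; rfl
  | cons c t ih =>
    intro init
    simp only [List.foldl_cons, List.map_cons]
    rw [ih]
    congr 1
    rw [min_def]
    split_ifs <;> omega

-- sorted-list index facts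
theorem sorted_getD_mono (s : List Int) (hp : s.Pairwise (· ≤ ·)) (p q : Nat)
    (hpq : p ≤ q) (hq : q < s.length) : s.getD p 0 ≤ s.getD q 0 := by
  rcases Nat.lt_or_ge p q with h | h
  · rw [List.getD_eq_getElem s 0 (lt_of_le_of_lt hpq hq), List.getD_eq_getElem s 0 hq]
    exact (List.pairwise_iff_getElem.mp hp) p q _ _ h
  · have : p = q := le_antisymm hpq h
    subst this; rfl

theorem getD_le_of_sublist (c s : List Int) (h : c.Sublist s) (hp : s.Pairwise (· ≤ ·)) :
    ∀ j < c.length, s.getD j 0 ≤ c.getD j 0 := by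
  induction h with
  | slnil => intro j hj; simp at hj
  | @cons l₁ l₂ a h ih =>
    intro j hj
    have hps : l₂.Pairwise (· ≤ ·) := hp.of_cons
    have hlen : j < l₂.length := lt_of_lt_of_le hj h.length_le
    have h1 : (a :: l₂).getD j 0 ≤ l₂.getD j 0 := by
      have : (a :: l₂).getD (j + 1) 0 = l₂.getD j 0 := by simp
      rw [← this]
      exact sorted_getD_mono (a :: l₂) hp j (j + 1) (Nat.le_succ j) (by simpa using hlen)
    exact le_trans h1 (ih hps j hj)
  | @cons₂ l₁ l₂ a h ih =>
    intro j hj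
    cases j with
    | zero => simp
    | succ j' =>
      have hps : l₂.Pairwise (· ≤ ·) := hp.of_cons
      simpa using ih hps j' (by simpa using hj)

theorem window_of_sublist (c s : List Int) (h : c.Sublist s) (hp : s.Pairwise (· ≤ ·))
    (hne : c ≠ []) : ∃ i : Nat, i + c.length ≤ s.length ∧ s.getD i 0 = c.getD 0 0 ∧
      s.getD (i + c.length - 1) 0 ≤ c.getD (c.length - 1) 0 := by
  induction h with
  | slnil => exact absurd rfl hne
  | @cons l₁ l₂ a h ih =>
    rcases ih hp.of_cons hne with ⟨i, h1, h2, h3⟩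
    have hl1 : 1 ≤ l₁.length := List.length_pos_of_ne_nil hne
    refine ⟨i + 1, by simp only [List.length_cons]; omega, by simpa using h2, ?_⟩
    have he : i + 1 + l₁.length - 1 = (i + l₁.length - 1) + 1 := by omega
    rw [he]
    simpa using h3
  | @cons₂ l₁ l₂ a h ih =>
    refine ⟨0, by simpa using Nat.succ_le_succ h.length_le, by simp, ?_⟩
    have := getD_le_of_sublist (a :: l₁) (a :: l₂) (h.cons₂ a) hp
      ((a :: l₁).length - 1) (by simp)
    simpa using this

-- extremes of a sorted nonempty list sit at its ends
theorem sorted_pyMaxD (l : List Int) (hp : l.Pairwise (· ≤ ·)) (hne : l ≠ []) :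
    pyMaxD l = l.getD (l.length - 1) 0 := by
  have hlen : 0 < l.length := List.length_pos_of_ne_nil hne
  refine le_antisymm ?_ ?_
  · rcases List.getElem_of_mem (pyMaxD_mem l hne) with ⟨p, hpl, hpe⟩
    rw [← hpe, ← List.getD_eq_getElem l 0 hpl]
    exact sorted_getD_mono l hp p (l.length - 1) (by omega) (by omega)
  · apply pyMaxD_ge l hne
    rw [List.getD_eq_getElem l 0 (by omega)]
    exact List.getElem_mem _
theorem sorted_pyMinD (l : List Int) (hp : l.Pairwise (· ≤ ·)) (hne : l ≠ []) :
    pyMinD l = l.getD 0 0 := by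
  have hlen : 0 < l.length := List.length_pos_of_ne_nil hne
  refine le_antisymm ?_ ?_
  · apply pyMinD_le l hne
    rw [List.getD_eq_getElem l 0 (by omega)]
    exact List.getElem_mem _
  · rcases List.getElem_of_mem (pyMinD_mem l hne) with ⟨p, hpl, hpe⟩
    rw [← hpe, ← List.getD_eq_getElem l 0 hpl]
    exact sorted_getD_mono l hp 0 p (by omega) hpl

-- window extremes
theorem window_max_min (s : List Int) (hp : s.Pairwise (· ≤ ·)) (i kn : Nat)
    (hk : 1 ≤ kn) (hikn : i + kn ≤ s.length) :
    pyMaxD ((s.drop i).take kn) = s.getD (i + kn - 1) 0 ∧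
    pyMinD ((s.drop i).take kn) = s.getD i 0 := by
  set w := (s.drop i).take kn with hw
  have hwlen : w.length = kn := by simp [hw]; omega
  have hwne : w ≠ [] := by
    intro hnil; rw [hnil] at hwlen; simp at hwlen; omega
  have hwget : ∀ j, (hj : j < kn) → w.getD j 0 = s.getD (i + j) 0 := by
    intro j hj
    have hj1 : j < w.length := by omega
    have hj2 : i + j < s.length := by omega
    rw [List.getD_eq_getElem w 0 hj1, List.getD_eq_getElem s 0 hj2]
    simp [hw]
  have hwsub : w.Pairwise (· ≤ ·) := by
    exact hp.sublist ((List.take_sublist _ _).trans (List.drop_sublist _ _))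
  constructor
  · rw [sorted_pyMaxD w hwsub hwne]
    rw [hwlen, hwget (kn - 1) (by omega)]
    congr 1; omega
  · rw [sorted_pyMinD w hwsub hwne]
    simpa using hwget 0 (by omega)

theorem main_eq (k : Int) (arr : List Int)
    (h1 : 1 ≤ k) (h2 : k ≤ (arr.length : Int)) :
    max_min_brute_force_approach k arr = max_min_brute_force_approach_alt k arr := by
  set kn := k.toNat with hknd
  have hk_eq : ((kn : Nat) : Int) = k := by omega
  set s := PySem.List.sorted arr (fun y => y) false with hs
  have hslen : s.length = arr.length := PySem.List.length_sorted arr (fun y => y) false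
  have hsp : s.Pairwise (· ≤ ·) := by
    simpa using PySem.List.sorted_pairwise arr (fun y => y)
  have hsperm : s.Perm arr := PySem.List.sorted_perm arr (fun y => y) false
  have hkn1 : 1 ≤ kn := by omega
  have hknn : kn ≤ arr.length := by omega
  -- A-side characterization
  have htake_len : (arr.take kn).length = kn := by rw [List.length_take]; omega
  have htake : arr.take kn ∈ pvCombos kn arr :=
    (mem_pvCombos arr kn _).mpr ⟨List.take_sublist _ _, htake_len⟩
  have hcs_ne : pvCombos kn arr ≠ [] := List.ne_nil_of_mem htake
  have hhead : (pvCombos kn arr).headD [] ∈ pvCombos kn arr := by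
    cases hcl : pvCombos kn arr with
    | nil => exact absurd hcl hcs_ne
    | cons aH t => simp
  have hA : max_min_brute_force_approach k arr
      = ((pvCombos kn arr).map (fun c => pyMaxD c - pyMinD c)).foldl min
          (pyMaxD ((pvCombos kn arr).headD []) - pyMinD ((pvCombos kn arr).headD [])) := by
    simp only [max_min_brute_force_approach]
    rw [← hknd, foldf_eq]
  have hA_mem : ∃ c ∈ pvCombos kn arr,
      max_min_brute_force_approach k arr = pyMaxD c - pyMinD c := by
    rw [hA]
    rcases foldlMin_cases ((pvCombos kn arr).map (fun c => pyMaxD c - pyMinD c))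
        (pyMaxD ((pvCombos kn arr).headD []) - pyMinD ((pvCombos kn arr).headD [])) with h | h
    · exact ⟨(pvCombos kn arr).headD [], hhead, h⟩
    · rcases List.mem_map.mp h with ⟨c, hc, hgc⟩
      exact ⟨c, hc, hgc.symm⟩
  have hA_le : ∀ c ∈ pvCombos kn arr,
      max_min_brute_force_approach k arr ≤ pyMaxD c - pyMinD c := by
    intro c hc
    rw [hA]
    exact foldlMin_le_mem _ _ _ (List.mem_map_of_mem hc)
  -- B-side characterization
  have hlen_int : PySem.List.len s = (arr.length : Int) := by
    rw [PySem.List.len_eq, hslen]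
  set diffs := (PySem.List.pyRange 0 ((arr.length : Int) - k + 1) 1).map
      (fun i => PySem.List.pyGetD s (i + k - 1) 0 - PySem.List.pyGetD s i 0) with hdiffs
  have hB : max_min_brute_force_approach_alt k arr
      = (PySem.List.min? diffs (fun y => y)).getD 0 := by
    simp only [max_min_brute_force_approach_alt]
    rw [← hs, hlen_int, hdiffs]
  have h0mem : (0 : Int) ∈ PySem.List.pyRange 0 ((arr.length : Int) - k + 1) 1 :=
    PySem.List.mem_pyRange_one.mpr ⟨le_refl 0, by omega⟩
  have hdne : diffs ≠ [] := by
    rw [hdiffs]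
    intro he
    rw [List.map_eq_nil_iff] at he
    rw [he] at h0mem
    simp at h0mem
  obtain ⟨m, hm⟩ : ∃ m, PySem.List.min? diffs (fun y => y) = some m := by
    cases hmm : PySem.List.min? diffs (fun y => y) with
    | none => exact absurd ((PySem.List.min?_eq_none_iff diffs _).mp hmm) hdne
    | some m0 => exact ⟨m0, rfl⟩
  have hBm : max_min_brute_force_approach_alt k arr = m := by rw [hB, hm]; rfl
  -- translating diffs entries to Nat windows
  have hdiff_elem : ∀ j : Nat, j + kn ≤ arr.length →
      (s.getD (j + kn - 1) 0 - s.getD j 0) ∈ diffs := by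
    intro j hj
    have hjmem : ((j : Nat) : Int) ∈ PySem.List.pyRange 0 ((arr.length : Int) - k + 1) 1 :=
      PySem.List.mem_pyRange_one.mpr ⟨Int.natCast_nonneg j, by omega⟩
    rw [hdiffs]
    refine List.mem_map.mpr ⟨(j : Int), hjmem, ?_⟩
    show PySem.List.pyGetD s ((j : Int) + k - 1) 0 - PySem.List.pyGetD s (j : Int) 0 = _
    rw [(by omega : ((j : Int) + k - 1) = ((j + kn - 1 : Nat) : Int)),
      PySem.List.pyGetD_natCast, PySem.List.pyGetD_natCast]
  have hB_le : ∀ j : Nat, j + kn ≤ arr.length →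
      m ≤ s.getD (j + kn - 1) 0 - s.getD j 0 := by
    intro j hj
    simpa using PySem.List.min?_isMin hm _ (hdiff_elem j hj)
  have hB_mem : ∃ j : Nat, j + kn ≤ arr.length ∧
      m = s.getD (j + kn - 1) 0 - s.getD j 0 := by
    have hmem : m ∈ diffs := PySem.List.min?_mem hm
    rw [hdiffs] at hmem
    rcases List.mem_map.mp hmem with ⟨i, hi, he⟩
    rcases PySem.List.mem_pyRange_one.mp hi with ⟨hi0, hi1⟩
    obtain ⟨j, rfl⟩ : ∃ j : Nat, i = (j : Int) := ⟨i.toNat, by omega⟩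
    refine ⟨j, by omega, ?_⟩
    rw [← he]
    rw [(by omega : ((j : Int) + k - 1) = ((j + kn - 1 : Nat) : Int)),
      PySem.List.pyGetD_natCast, PySem.List.pyGetD_natCast]
  -- A ≤ m
  have hAleB : max_min_brute_force_approach k arr ≤ m := by
    rcases hB_mem with ⟨j, hj, hme⟩
    have hjs : j + kn ≤ s.length := by omega
    have hwsub : ((s.drop j).take kn).Sublist s :=
      (List.take_sublist _ _).trans (List.drop_sublist _ _)
    have hwlen : ((s.drop j).take kn).length = kn := by
      simp only [List.length_take, List.length_drop]; omega
    have hwne : (s.drop j).take kn ≠ [] := by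
      intro he; rw [he] at hwlen; simp at hwlen; omega
    rcases hwsub.subperm.trans hsperm.subperm with ⟨c, hcw, hcarr⟩
    have hcne : c ≠ [] := by
      intro he
      exact hwne (List.Perm.eq_nil (he ▸ hcw.symm))
    have hclen : c.length = kn := by rw [hcw.length_eq, hwlen]
    have hcmem : c ∈ pvCombos kn arr := (mem_pvCombos arr kn c).mpr ⟨hcarr, hclen⟩
    have hwmax := window_max_min s hsp j kn hkn1 hjs
    have hge : pyMaxD c - pyMinD c = s.getD (j + kn - 1) 0 - s.getD j 0 := by
      rw [pyMaxD_perm c _ hcw hcne, pyMinD_perm c _ hcw hcne, hwmax.1, hwmax.2]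
    calc max_min_brute_force_approach k arr ≤ pyMaxD c - pyMinD c := hA_le c hcmem
      _ = s.getD (j + kn - 1) 0 - s.getD j 0 := hge
      _ = m := hme.symm
  -- m ≤ A
  have hBleA : m ≤ max_min_brute_force_approach k arr := by
    rcases hA_mem with ⟨c, hcmem, hce⟩
    rcases (mem_pvCombos arr kn c).mp hcmem with ⟨hcsub, hclen⟩
    have hcne : c ≠ [] := by
      intro he; rw [he] at hclen; simp at hclen; omega
    set c' := PySem.List.sorted c (fun y => y) false with hc'
    have hc'p : c'.Pairwise (· ≤ ·) := by simpa using PySem.List.sorted_pairwise c (fun y => y)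
    have hc'perm : c'.Perm c := PySem.List.sorted_perm c (fun y => y) false
    have hc'ne : c' ≠ [] := by
      intro he
      exact hcne (List.Perm.eq_nil (he ▸ hc'perm).symm)
    have hc'len : c'.length = kn := by rw [hc'perm.length_eq, hclen]
    have hsubp : List.Subperm c' s :=
      List.Subperm.trans ⟨c, hc'perm.symm, hcsub⟩ hsperm.symm.subperm
    have hsub : c'.Sublist s := List.sublist_of_subperm_of_pairwise hsubp hc'p hsp
    rcases window_of_sublist c' s hsub hsp hc'ne with ⟨i, hi1, hi2, hi3⟩
    rw [hc'len] at hi1 hi3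
    have h1 : m ≤ s.getD (i + kn - 1) 0 - s.getD i 0 := hB_le i (by omega)
    have h2 : s.getD (i + kn - 1) 0 - s.getD i 0 ≤ pyMaxD c - pyMinD c := by
      rw [pyMaxD_perm c c' hc'perm.symm hcne, pyMinD_perm c c' hc'perm.symm hcne,
        sorted_pyMaxD c' hc'p hc'ne, sorted_pyMinD c' hc'p hc'ne, hc'len]
      omega
    omega
  rw [hBm]
  exact le_antisymm hAleB hBleA

-- ===== VERDICT (by name: the statement is the Claim_ definition above) =====
theorem max_min_brute_force_approach_spec : Claim_equal_max_min_brute_force_approach := by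
  intro k arr _ hpre
  unfold Spec_max_min_brute_force_approach
  exact main_eq k arr hpre.1 hpre.2
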